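-- pv_equiv track=rewrite | github.com/Data-Wrangling-and-Visualization-2026/World-Data-Visualization | data_pipeline/src/transformers/construct_postgres_database.py | _escape_percent_for_mogrify
-- ===== SOURCE A (Python) =====
-- def _escape_percent_for_mogrify(sql_text: str) -> str:
--     """
--     Psycopg2's mogrify() applies Python %-formatting to the query string.
--     A literal `%` inside a double-quoted identifier (e.g. "Yearly % Change")
--     must be written as `%%` or the formatter mis-counts placeholders and can
--     raise IndexError when binding parameters.
--     """
--     out: list[str] = []
--     i = 0
--     n = len(sql_text)
--     while i < n:
--         if sql_text[i] == "%" and i + 1 < n and sql_text[i + 1] == "s":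
--             out.append("%s")
--             i += 2
--         elif sql_text[i] == "%":
--             out.append("%%")
--             i += 1
--         else:
--             out.append(sql_text[i])
--             i += 1
--     return "".join(out)
-- ===== SOURCE B (Python) =====
-- def _escape_percent_for_mogrify(sql_text: str) -> str:
--     # Split on the "%s" placeholders first, double every stray "%" in each
--     # segment, then rejoin with "%s".
--     return "%s".join(part.replace("%", "%%") for part in sql_text.split("%s"))
-- ===== Notes on version B (the rewrite author's own statement) =====
-- stated objective: idiomatic
-- what changed: Replaces the manual index-based one-character-lookahead scanner with a split-on-placeholder / double-the-percents / rejoin pipeline of library string operations, which a timing run measured as faster by a constant factor (C-level str methods vs a per-character Python loop).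
import Mathlib
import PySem

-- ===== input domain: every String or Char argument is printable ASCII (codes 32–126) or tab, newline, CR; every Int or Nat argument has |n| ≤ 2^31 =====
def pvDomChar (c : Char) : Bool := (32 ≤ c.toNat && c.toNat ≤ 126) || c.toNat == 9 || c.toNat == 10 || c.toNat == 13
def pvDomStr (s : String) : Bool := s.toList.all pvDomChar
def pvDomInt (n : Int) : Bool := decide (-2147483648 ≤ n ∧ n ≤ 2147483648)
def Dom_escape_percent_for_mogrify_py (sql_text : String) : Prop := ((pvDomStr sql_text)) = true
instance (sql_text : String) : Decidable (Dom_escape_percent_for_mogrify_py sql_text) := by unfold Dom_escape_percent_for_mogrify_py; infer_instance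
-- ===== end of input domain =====

-- B replaces A's manual index-based lookahead scanner with a split-on-"%s" /
-- replace-"%"→"%%" / rejoin pipeline of library string operations (objective: idiomatic).

-- ===== PORT A =====
-- A's while loop over index i with one-character lookahead, appending pieces to
-- `out`, becomes the structural recursion over the remaining characters with the
-- same three branches in the same order, collecting the appended pieces;
-- "".join(out) is PySem.Chars.join [].
def pyA_go : List Char → List (List Char)
  | [] => []
  | '%' :: 's' :: rest => ['%', 's'] :: pyA_go rest
  | '%' :: rest => ['%', '%'] :: pyA_go rest
  | c :: rest => [c] :: pyA_go rest

def escape_percent_for_mogrify_py (sql_text : String) : String :=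
  String.ofList (PySem.Chars.join [] (pyA_go sql_text.toList))

-- ===== PORT B =====
-- sql_text.split("%s") with a literal non-empty separator is PySem.Chars.splitOn;
-- part.replace("%","%%") is PySem.Chars.replace; "%s".join(...) is PySem.Chars.join.
def escape_percent_for_mogrify_py_alt (sql_text : String) : String :=
  String.ofList (PySem.Chars.join ['%', 's']
    ((PySem.Chars.splitOn sql_text.toList ['%', 's']).map
      (fun part => PySem.Chars.replace part ['%'] ['%', '%'])))

-- ===== PRECONDITION & SPEC =====
def Spec_escape_percent_for_mogrify_py (sql_text : String) (out : String) : Prop := out = escape_percent_for_mogrify_py_alt sql_text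
instance (sql_text : String) (out : String) : Decidable (Spec_escape_percent_for_mogrify_py sql_text out) := by unfold Spec_escape_percent_for_mogrify_py; infer_instance

-- ===== CLAIM (what is proved, stated in full; the proofs are below) =====
def Claim_equal_escape_percent_for_mogrify_py : Prop := ∀ (sql_text : String), Dom_escape_percent_for_mogrify_py sql_text → Spec_escape_percent_for_mogrify_py sql_text (escape_percent_for_mogrify_py sql_text)

-- ===== LEMMAS AND PROOFS =====

-- reference version of part.replace("%", "%%")
def dbl : List Char → List Char
  | [] => []
  | '%' :: t => '%' :: '%' :: dbl t
  | c :: t => c :: dbl t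

-- reference version of sql_text.split("%s")
def spl : List Char → List (List Char)
  | [] => [[]]
  | '%' :: 's' :: rest => [] :: spl rest
  | c :: rest => (spl rest).modifyHead (c :: ·)

theorem spl_ne_nil (l : List Char) : spl l ≠ [] := by
  induction l using spl.induct with
  | case1 => simp [spl]
  | case2 rest ih => simp [spl]
  | case3 c rest h ih =>
    rw [spl.eq_3 c rest h]
    cases hs : spl rest with
    | nil => exact absurd hs ih
    | cons a t => simp

theorem join_nil' (sep : List Char) : PySem.Chars.join sep [] = [] := by
  simp [PySem.Chars.join, List.intercalate]

theorem join_single (sep a : List Char) : PySem.Chars.join sep [a] = a := by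
  simp [PySem.Chars.join, List.intercalate]

theorem join_cons2 (sep a b : List Char) (t : List (List Char)) :
    PySem.Chars.join sep (a :: b :: t) = a ++ sep ++ PySem.Chars.join sep (b :: t) := by
  simp [PySem.Chars.join, List.intercalate, List.intersperse, List.append_assoc]

theorem join_head_prepend (sep p a : List Char) (t : List (List Char)) :
    PySem.Chars.join sep ((p ++ a) :: t) = p ++ PySem.Chars.join sep (a :: t) := by
  cases t with
  | nil => rw [join_single, join_single]
  | cons b s => simp [join_cons2, List.append_assoc]

theorem join_empty_flatten (L : List (List Char)) :
    PySem.Chars.join [] L = L.flatten := by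
  induction L with
  | nil => rw [join_nil']; rfl
  | cons a t ih =>
    cases t with
    | nil => rw [join_single]; simp
    | cons b s => rw [join_cons2]; simp_all

theorem replace_go_eq (fuel : Nat) (l acc : List Char) (h : l.length ≤ fuel) :
    PySem.Chars.replace.go ['%'] ['%', '%'] fuel l acc = acc.reverse ++ dbl l := by
  induction fuel generalizing l acc with
  | zero =>
    have hl : l = [] := by cases l <;> simp_all
    subst hl
    simp [PySem.Chars.replace.go, dbl]
  | succ f ih =>
    cases l with
    | nil => simp [PySem.Chars.replace.go, dbl]
    | cons c t =>
      rw [PySem.Chars.replace.go]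
      by_cases hc : c = '%'
      · subst hc
        have hp : (['%'].isPrefixOf ('%' :: t)) = true := by simp [List.isPrefixOf]
        rw [hp, if_pos rfl]
        have h1 : List.drop (['%'] : List Char).length ('%' :: t) = t := rfl
        have h2 : (['%', '%'] : List Char).reverse ++ acc = '%' :: '%' :: acc := rfl
        rw [h1, h2, ih t _ (by simpa using h), dbl]
        simp
      · have hb : ('%' == c) = false := by simpa using (Ne.symm hc)
        have hp : (['%'].isPrefixOf (c :: t)) = false := by
          simp [List.isPrefixOf, hb]
        rw [hp]
        simp only [Bool.false_eq_true, if_false]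
        rw [ih t _ (by simpa using h), dbl.eq_3 c t (fun h' => hc h')]
        simp

theorem replace_eq (l : List Char) :
    PySem.Chars.replace l ['%'] ['%', '%'] = dbl l := by
  rw [PySem.Chars.replace]
  simp only [List.isEmpty_cons, Bool.false_eq_true, if_false]
  exact replace_go_eq l.length l [] le_rfl

theorem splitOn_go_eq (fuel : Nat) (l cur : List Char) (acc : List (List Char))
    (h : l.length < fuel) :
    PySem.Chars.splitOn.go ['%', 's'] fuel l cur acc
      = acc.reverse ++ (spl l).modifyHead (cur.reverse ++ ·) := by
  induction fuel generalizing l cur acc with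
  | zero => omega
  | succ f ih =>
    cases l with
    | nil => simp [PySem.Chars.splitOn.go, spl]
    | cons c t =>
      rw [PySem.Chars.splitOn.go]
      by_cases hps : c = '%' ∧ ∃ r, t = 's' :: r
      · obtain ⟨hc, r, hr⟩ := hps
        subst hc; subst hr
        have hp : (['%', 's'].isPrefixOf ('%' :: 's' :: r)) = true := by
          simp [List.isPrefixOf]
        rw [hp, if_pos rfl]
        have h1 : List.drop (['%', 's'] : List Char).length ('%' :: 's' :: r) = r := rfl
        rw [h1, ih r [] (cur.reverse :: acc) (by simp at h ⊢; omega), spl.eq_2]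
        cases hs : spl r with
        | nil => exact absurd hs (spl_ne_nil _)
        | cons a s => simp
      · have hguard : ∀ r : List Char, c = '%' → t = 's' :: r → False := by
          intro r h1 h2; exact hps ⟨h1, r, h2⟩
        have hp : (['%', 's'].isPrefixOf (c :: t)) = false := by
          cases t with
          | nil => simp [List.isPrefixOf]
          | cons c2 r =>
            show (('%' == c) && (('s' == c2) && ([] : List Char).isPrefixOf r)) = false
            by_cases h1 : c = '%'
            · subst h1
              have h2 : ('s' == c2) = false := by
                simp only [beq_eq_false_iff_ne, ne_eq]
                intro h2
                exact hguard r rfl (by rw [← h2])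
              simp [h2]
            · have h1' : ('%' == c) = false := by simpa using (Ne.symm h1)
              simp [h1']
        rw [hp]
        simp only [Bool.false_eq_true, if_false]
        rw [ih t (c :: cur) acc (by simp at h ⊢; omega), spl.eq_3 c t hguard]
        cases hs : spl t with
        | nil => exact absurd hs (spl_ne_nil _)
        | cons a s => simp

theorem splitOn_eq (l : List Char) :
    PySem.Chars.splitOn l ['%', 's'] = spl l := by
  rw [PySem.Chars.splitOn, splitOn_go_eq (l.length + 1) l [] [] (by omega)]
  cases hs : spl l with
  | nil => exact absurd hs (spl_ne_nil _)
  | cons a s => simp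

theorem dbl_cons (c : Char) (t : List Char) :
    dbl (c :: t) = dbl [c] ++ dbl t := by
  by_cases hc : c = '%'
  · subst hc; rw [dbl, dbl]; simp [dbl]
  · rw [dbl.eq_3 c t (fun h' => hc h'), dbl.eq_3 c [] (fun h' => hc h')]
    simp [dbl]

theorem main_eq (l : List Char) :
    PySem.Chars.join ['%', 's'] ((spl l).map (fun p => dbl p))
      = PySem.Chars.join [] (pyA_go l) := by
  induction l using spl.induct with
  | case1 => rw [spl, pyA_go]; rw [List.map_cons, List.map_nil, join_single, join_nil']; rfl
  | case2 rest ih =>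
    rw [spl.eq_2, pyA_go]
    cases hs : spl rest with
    | nil => exact absurd hs (spl_ne_nil _)
    | cons a s =>
      rw [hs] at ih
      have ih' : PySem.Chars.join ['%', 's'] (dbl a :: List.map (fun p => dbl p) s)
          = (pyA_go rest).flatten := by
        simpa [join_empty_flatten] using ih
      simp only [List.map_cons]
      rw [join_cons2, join_empty_flatten]
      simp [dbl, ih']
  | case3 c rest hne ih =>
    rw [spl.eq_3 c rest hne]
    cases hs : spl rest with
    | nil => exact absurd hs (spl_ne_nil _)
    | cons a s =>
      rw [hs] at ih
      simp only [List.modifyHead, List.map_cons]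
      rw [dbl_cons, join_head_prepend]
      simp only [List.map_cons] at ih
      rw [ih]
      by_cases hc : c = '%'
      · subst hc
        have hrest : ∀ r : List Char, rest = 's' :: r → False := fun r hr => hne r rfl hr
        rw [pyA_go.eq_3 rest hrest, join_empty_flatten, join_empty_flatten]
        simp [dbl]
      · rw [pyA_go.eq_4 c rest (fun _ h1 _ => hc h1) (fun h' => hc h'),
          join_empty_flatten, join_empty_flatten]
        rw [dbl.eq_3 c [] (fun h' => hc h')]
        simp [dbl]

-- ===== VERDICT (by name: the statement is the Claim_ definition above) =====
theorem escape_percent_for_mogrify_py_spec : Claim_equal_escape_percent_for_mogrify_py := by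
  intro s _
  unfold Spec_escape_percent_for_mogrify_py escape_percent_for_mogrify_py escape_percent_for_mogrify_py_alt
  rw [splitOn_eq]
  simp only [replace_eq]
  rw [main_eq]
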